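-- pv_equiv track=rewrite | github.com/nschloe/meshio | meshio/mdpa_io.py | cell_data_from_raw
-- ===== SOURCE A (Python) =====
-- def cell_data_from_raw(cells, cell_data_raw):
--     cell_data = {k: {} for k in cells}
--     for key in cell_data_raw:
--         d = cell_data_raw[key]
--         r = 0
--         for k in cells:
--             cell_data[k][key] = d[r : r + len(cells[k])]
--             r += len(cells[k])
--
--     return cell_data
-- ===== SOURCE B (Python) =====
-- def cell_data_from_raw(cells, cell_data_raw):
--     keys = list(cell_data_raw)
--     # Pass 1: cut each raw array into consecutive pieces by repeatedly splitting
--     # off the prefix for the next block and keeping the remainder (no offsets).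
--     columns = []
--     for d in cell_data_raw.values():
--         pieces = []
--         for v in cells.values():
--             piece, d = d[:len(v)], d[len(v):]
--             pieces.append(piece)
--         columns.append(pieces)
--     # Pass 2: transpose the column table into one dict per cell block.
--     return {k: dict(zip(keys, (col[i] for col in columns)))
--             for i, k in enumerate(cells)}
-- ===== Notes on version B (the rewrite author's own statement) =====
-- stated objective: alternative
-- what changed: B never computes offsets: pass 1 cuts each raw array into consecutive pieces by repeatedly splitting off the prefix for the next block and keeping the remainder (building a column table per data key), and pass 2 transposes that table into one dict per cell block; A instead mutates pre-seeded empty dicts while threading a running offset r and slicing d[r:r+len] inside the inner loop.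
import Mathlib
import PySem

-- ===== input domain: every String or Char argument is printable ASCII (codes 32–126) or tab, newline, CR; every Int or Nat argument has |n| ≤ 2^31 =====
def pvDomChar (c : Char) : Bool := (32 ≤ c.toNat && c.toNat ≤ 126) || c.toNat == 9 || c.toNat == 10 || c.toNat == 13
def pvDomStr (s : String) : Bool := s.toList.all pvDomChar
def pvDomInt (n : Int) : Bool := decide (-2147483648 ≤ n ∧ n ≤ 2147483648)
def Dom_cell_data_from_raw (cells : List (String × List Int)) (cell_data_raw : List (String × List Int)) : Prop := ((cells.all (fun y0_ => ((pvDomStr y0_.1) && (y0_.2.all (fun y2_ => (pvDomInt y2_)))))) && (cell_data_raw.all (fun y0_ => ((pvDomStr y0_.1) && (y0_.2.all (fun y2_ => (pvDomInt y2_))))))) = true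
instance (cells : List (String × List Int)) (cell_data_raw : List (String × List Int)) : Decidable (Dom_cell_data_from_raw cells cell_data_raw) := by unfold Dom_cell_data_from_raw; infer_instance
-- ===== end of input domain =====

-- B cuts each raw array into consecutive pieces by repeatedly splitting off the next block's prefix
-- (no offsets computed) and then transposes the resulting column table; alternative decomposition, same cost.

-- ===== PORT A =====
-- literal transliteration of A: seed {k: {} for k in cells}, then for each key in cell_data_raw
-- thread a running offset r over the blocks, storing d[r : r + len(cells[k])] into cell_data[k][key].
def cell_data_from_raw (cells : List (String × List Int)) (cell_data_raw : List (String × List Int)) : List (String × List (String × List Int)) :=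
  let cellsD : PySem.Dict String (List Int) := PySem.Dict.ofList cells
  let cdrD : PySem.Dict String (List Int) := PySem.Dict.ofList cell_data_raw
  let cell_data0 : PySem.Dict String (PySem.Dict String (List Int)) :=
    cellsD.keys.foldl (fun acc k => acc.insert k PySem.Dict.empty) PySem.Dict.empty
  let cell_data :=
    cdrD.keys.foldl (fun cd key =>
      let d := cdrD.getD key []
      (cellsD.keys.foldl
        (fun (st : PySem.Dict String (PySem.Dict String (List Int)) × Int) k =>
          let len : Int := ((cellsD.getD k []).length : Int)
          (st.1.insert k ((st.1.getD k PySem.Dict.empty).insert key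
              (PySem.List.slice d (some st.2) (some (st.2 + len)))),
           st.2 + len))
        (cd, (0 : Int))).1)
      cell_data0
  cell_data.items.map (fun p => (p.1, p.2.items))

-- ===== PORT B =====
-- B's pass 1 inner loop: cut d into one piece per block -- piece, d = d[:len(v)], d[len(v):]
def pvCut : List (List Int) → List Int → List (List Int)
  | [], _ => []
  | v :: vs, d =>
      PySem.List.slice d none (some (v.length : Int)) ::
        pvCut vs (PySem.List.slice d (some (v.length : Int)) none)

-- B: build the column table (one column per raw key), then transpose it per cell block.
-- col[i] is always in range (each column holds one piece per block), so pyGetD is exact for col[i].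
def cell_data_from_raw_alt (cells : List (String × List Int)) (cell_data_raw : List (String × List Int)) : List (String × List (String × List Int)) :=
  let cellsD : PySem.Dict String (List Int) := PySem.Dict.ofList cells
  let cdrD : PySem.Dict String (List Int) := PySem.Dict.ofList cell_data_raw
  let keys := cdrD.keys
  let columns := cdrD.values.map (fun d => pvCut cellsD.values d)
  (PySem.List.enumerate cellsD.keys).map (fun p =>
    (p.2, (PySem.Dict.ofList (keys.zip (columns.map (fun col => PySem.List.pyGetD col p.1 [])))).items))

-- ===== PRECONDITION & SPEC =====
def Spec_cell_data_from_raw (cells : List (String × List Int)) (cell_data_raw : List (String × List Int)) (out : List (String × List (String × List Int))) : Prop := out = cell_data_from_raw_alt cells cell_data_raw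
instance (cells : List (String × List Int)) (cell_data_raw : List (String × List Int)) (out : List (String × List (String × List Int))) : Decidable (Spec_cell_data_from_raw cells cell_data_raw out) := by unfold Spec_cell_data_from_raw; infer_instance

-- ===== CLAIM (what is proved, stated in full; the proofs are below) =====
def Claim_equal_cell_data_from_raw : Prop := ∀ (cells : List (String × List Int)) (cell_data_raw : List (String × List Int)), Dom_cell_data_from_raw cells cell_data_raw → Spec_cell_data_from_raw cells cell_data_raw (cell_data_from_raw cells cell_data_raw)

-- ===== LEMMAS AND PROOFS =====

-- the common shape both ports reduce to: one row per block (offsets threaded once),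
-- each row holding the slices of every raw array of P.
def pvRowsFor (P : List (String × List Int)) : List (String × List Int) → Int → List (String × PySem.Dict String (List Int))
  | [], _ => []
  | p :: ps, r =>
      (p.1, PySem.Dict.mk (P.map (fun q => (q.1, PySem.List.slice q.2 (some r) (some (r + (p.2.length : Int))))))) ::
        pvRowsFor P ps (r + (p.2.length : Int))

theorem map_fst_pvRowsFor (P ps : List (String × List Int)) (r : Int) :
    (pvRowsFor P ps r).map Prod.fst = ps.map Prod.fst := by
  induction ps generalizing r with
  | nil => rfl
  | cons p ps ih => simp [pvRowsFor, ih]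

theorem pvRowsFor_nil (ps : List (String × List Int)) (r : Int) :
    pvRowsFor [] ps r = ps.map (fun p => (p.1, (PySem.Dict.empty : PySem.Dict String (List Int)))) := by
  induction ps generalizing r with
  | nil => rfl
  | cons p ps ih => simp only [pvRowsFor, List.map_cons, List.map_nil, ih]; rfl

-- updating one entry of an assoc list whose keys are distinct
theorem map_update_middle {α : Type} (L1 L2 : List (String × α)) (k : String) (w w' : α)
    (h1 : k ∉ L1.map Prod.fst) (h2 : k ∉ L2.map Prod.fst) :
    (L1 ++ (k, w) :: L2).map (fun p => if p.1 == k then (k, w') else p) = L1 ++ (k, w') :: L2 := by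
  induction L1 with
  | nil =>
      simp only [List.nil_append, List.map_cons]
      rw [if_pos (by simp)]
      have h : List.map (fun p : String × α => if (p.1 == k) = true then (k, w') else p) L2
          = List.map id L2 := by
        refine List.map_congr_left ?_
        intro p hp
        have hne : p.1 ≠ k := fun h => h2 (h ▸ List.mem_map_of_mem hp)
        simp [hne]
      rw [h, List.map_id]
  | cons a L1 ih =>
      have ha : a.1 ≠ k := by intro h; exact h1 (by simp [h])
      have h1' : k ∉ L1.map Prod.fst := fun h => h1 (by simp [h])
      simp only [List.cons_append, List.map_cons]
      rw [if_neg (by simp [ha]), ih h1']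

-- A's inner loop, described at the items level: given items = processed ++ rows, it rewrites each row in place
def pvUpdRows (key : String) (d : List Int) :
    List (String × List Int) → List (String × PySem.Dict String (List Int)) → Int → List (String × PySem.Dict String (List Int))
  | p :: ps, (_, w) :: ws, r =>
      (p.1, w.insert key (PySem.List.slice d (some r) (some (r + (p.2.length : Int))))) ::
        pvUpdRows key d ps ws (r + (p.2.length : Int))
  | _, _, _ => []

theorem inner_fold_items (cellsD : PySem.Dict String (List Int)) (key : String) (d : List Int)
    (ps : List (String × List Int)) :
    ∀ (rows processed : List (String × PySem.Dict String (List Int)))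
      (cd : PySem.Dict String (PySem.Dict String (List Int))) (r : Int),
      cd.items = processed ++ rows →
      cd.keys.Nodup →
      rows.map Prod.fst = ps.map Prod.fst →
      (∀ p ∈ ps, cellsD.get? p.1 = some p.2) →
      (((ps.map Prod.fst).foldl
          (fun (st : PySem.Dict String (PySem.Dict String (List Int)) × Int) k =>
            let len : Int := ((cellsD.getD k []).length : Int)
            (st.1.insert k ((st.1.getD k PySem.Dict.empty).insert key
                (PySem.List.slice d (some st.2) (some (st.2 + len)))),
             st.2 + len))
          (cd, r)).1).items = processed ++ pvUpdRows key d ps rows r := by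
  induction ps with
  | nil =>
      intro rows processed cd r hitems hnd hkeys hget
      have hrows : rows = [] := by
        cases rows with
        | nil => rfl
        | cons a l => simp at hkeys
      subst hrows
      simpa [pvUpdRows] using hitems
  | cons p ps ih =>
      intro rows processed cd r hitems hnd hkeys hget
      obtain ⟨⟨k0, w⟩, ws, rfl⟩ : ∃ a l, rows = a :: l := by
        cases rows with
        | nil => simp at hkeys
        | cons a l => exact ⟨a, l, rfl⟩
      have hk0 : k0 = p.1 := by simpa using congrArg (fun l => l.headI) hkeys
      subst hk0
      have hkeys' : ws.map Prod.fst = ps.map Prod.fst := by simpa using hkeys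
      have hkeysList : cd.keys = processed.map Prod.fst ++ p.1 :: ws.map Prod.fst := by
        simp [PySem.Dict.keys, hitems]
      have hnotL1 : p.1 ∉ processed.map Prod.fst := by
        have h := hnd; rw [hkeysList] at h
        exact fun hm => (List.disjoint_of_nodup_append h) hm (by simp)
      have hnotL2 : p.1 ∉ ws.map Prod.fst := by
        have h := hnd; rw [hkeysList] at h
        have h2 := (List.nodup_append.mp h).2.1
        simpa using (List.nodup_cons.mp h2).1
      have hmem : (p.1, w) ∈ cd.items := by rw [hitems]; simp
      have hgetw : cd.getD p.1 PySem.Dict.empty = w :=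
        PySem.Dict.getD_of_mem_items cd hmem hnd _
      have hlen : cellsD.getD p.1 [] = p.2 := by
        rw [PySem.Dict.getD_eq_get?_getD, hget p (by simp)]; rfl
      have hcont : cd.contains p.1 = true := by
        rw [PySem.Dict.contains_iff_mem_keys, hkeysList]; simp
      have hins : (cd.insert p.1 (w.insert key (PySem.List.slice d (some r) (some (r + (p.2.length : Int)))))).items
          = processed ++ (p.1, w.insert key (PySem.List.slice d (some r) (some (r + (p.2.length : Int))))) :: ws := by
        rw [PySem.Dict.items_insert_of_contains _ _ hcont, hitems]
        exact map_update_middle processed ws p.1 w _ hnotL1 hnotL2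
      have hndins : (cd.insert p.1 (w.insert key (PySem.List.slice d (some r) (some (r + (p.2.length : Int)))))).keys.Nodup := by
        have hk : (cd.insert p.1 (w.insert key (PySem.List.slice d (some r) (some (r + (p.2.length : Int)))))).keys = cd.keys := by
          simp [PySem.Dict.keys, hins, hitems]
        rw [hk]; exact hnd
      simp only [List.map_cons, List.foldl_cons]
      have hrec := ih ws (processed ++ [(p.1, w.insert key (PySem.List.slice d (some r) (some (r + (p.2.length : Int)))))])
        (cd.insert p.1 (w.insert key (PySem.List.slice d (some r) (some (r + (p.2.length : Int))))))
        (r + (p.2.length : Int))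
        (by simpa using hins) hndins hkeys' (fun q hq => hget q (by simp [hq]))
      simp only [hgetw, hlen] at hrec ⊢
      simpa [pvUpdRows] using hrec

theorem pvUpdRows_rowsFor (key : String) (d : List Int) (P : List (String × List Int))
    (hkey : key ∉ P.map Prod.fst) :
    ∀ (ps : List (String × List Int)) (r : Int),
      pvUpdRows key d ps (pvRowsFor P ps r) r = pvRowsFor (P ++ [(key, d)]) ps r := by
  intro ps
  induction ps with
  | nil => intro r; rfl
  | cons p ps ih =>
      intro r
      have hcont : (PySem.Dict.mk (P.map (fun q => (q.1, PySem.List.slice q.2 (some r) (some (r + (p.2.length : Int))))))).contains key = false := by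
        rw [PySem.Dict.contains_mk]
        simp only [List.any_eq_false]
        intro x hx
        rcases List.mem_map.mp hx with ⟨q, hq, rfl⟩
        have hne : q.1 ≠ key := fun h => hkey (h ▸ List.mem_map_of_mem hq)
        simpa using hne
      have hins := PySem.Dict.items_insert_of_not_contains
        (PySem.Dict.mk (P.map (fun q => (q.1, PySem.List.slice q.2 (some r) (some (r + (p.2.length : Int)))))))
        (PySem.List.slice d (some r) (some (r + (p.2.length : Int)))) hcont
      simp only [pvRowsFor, pvUpdRows]
      rw [ih (r + (p.2.length : Int))]
      congr 1
      exact congrArg (Prod.mk p.1) (PySem.Dict.ext (by simpa [List.map_append] using hins))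

-- A's outer loop keeps cell_data.items in the pvRowsFor shape, accumulating the processed (key, d) pairs
theorem outer_fold_items (cellsD : PySem.Dict String (List Int)) (hnd : cellsD.keys.Nodup) :
    ∀ (Q P : List (String × List Int)) (cd : PySem.Dict String (PySem.Dict String (List Int))),
      cd.items = pvRowsFor P cellsD.items 0 →
      ((P ++ Q).map Prod.fst).Nodup →
      (Q.foldl (fun cd q =>
        (cellsD.keys.foldl
          (fun (st : PySem.Dict String (PySem.Dict String (List Int)) × Int) k =>
            let len : Int := ((cellsD.getD k []).length : Int)
            (st.1.insert k ((st.1.getD k PySem.Dict.empty).insert q.1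
                (PySem.List.slice q.2 (some st.2) (some (st.2 + len)))),
             st.2 + len))
          (cd, (0 : Int))).1) cd).items = pvRowsFor (P ++ Q) cellsD.items 0 := by
  intro Q
  induction Q with
  | nil => intro P cd h _; simpa using h
  | cons q Q ih =>
      intro P cd h hndpq
      have hsplit : ((P.map Prod.fst) ++ ((q :: Q).map Prod.fst)).Nodup := by
        simpa [List.map_append] using hndpq
      have hkeyq : q.1 ∉ P.map Prod.fst := by
        have hdisj := List.disjoint_of_nodup_append hsplit
        exact fun hm => hdisj hm (by simp)
      have hcdnd : cd.keys.Nodup := by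
        have hkeq : cd.keys = cellsD.items.map Prod.fst := by
          simp [PySem.Dict.keys, h, map_fst_pvRowsFor]
        rw [hkeq]; exact hnd
      have hget : ∀ p ∈ cellsD.items, cellsD.get? p.1 = some p.2 := by
        intro p hp; exact PySem.Dict.get?_of_mem_items cellsD hp hnd
      have hkeys : cellsD.keys = cellsD.items.map Prod.fst := rfl
      have hstep := inner_fold_items cellsD q.1 q.2 cellsD.items
        (pvRowsFor P cellsD.items 0) [] cd 0 (by simpa using h) hcdnd
        (map_fst_pvRowsFor P cellsD.items 0) hget
      simp only [List.foldl_cons]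
      have hnext : ((cellsD.keys.foldl
          (fun (st : PySem.Dict String (PySem.Dict String (List Int)) × Int) k =>
            let len : Int := ((cellsD.getD k []).length : Int)
            (st.1.insert k ((st.1.getD k PySem.Dict.empty).insert q.1
                (PySem.List.slice q.2 (some st.2) (some (st.2 + len)))),
             st.2 + len))
          (cd, (0 : Int))).1).items = pvRowsFor (P ++ [q]) cellsD.items 0 := by
        rw [hkeys, hstep]
        simpa using pvUpdRows_rowsFor q.1 q.2 P hkeyq cellsD.items 0
      have hfin := ih (P ++ [q]) _ hnext (by simpa using hndpq)
      simpa using hfin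

-- B side: Dict.ofList of an assoc list with distinct keys is that list
theorem items_ofList_nodup {ν : Type} (l : List (String × ν)) (h : (l.map Prod.fst).Nodup) :
    (PySem.Dict.ofList l).items = l := by
  simp only [PySem.Dict.ofList, PySem.Dict.update]
  have := PySem.Dict.items_foldl_insert_fresh l Prod.fst Prod.snd PySem.Dict.empty (by simp) h
  simpa using this

theorem enum_shift {α : Type} (xs : List α) (s : Int) :
    PySem.List.enumerate xs (s + 1) = (PySem.List.enumerate xs s).map (fun p => (p.1 + 1, p.2)) := by
  induction xs generalizing s with
  | nil => rfl
  | cons x xs ih => simp [PySem.List.enumerate_cons, ih]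

theorem cut_rows (Q : List (String × List Int)) :
    ∀ (ps : List (String × List Int)) (r : Nat),
      (PySem.List.enumerate (ps.map Prod.fst)).map (fun p =>
          (p.2, (Q.map Prod.fst).zip ((Q.map (fun q => pvCut (ps.map Prod.snd) (q.2.drop r))).map
              (fun col => PySem.List.pyGetD col p.1 []))))
      = (pvRowsFor Q ps (r : Int)).map (fun p => (p.1, p.2.items)) := by
  intro ps
  induction ps with
  | nil => intro r; rfl
  | cons p ps ih =>
      intro r
      simp only [List.map_cons, PySem.List.enumerate_cons, pvRowsFor]
      congr 1
      · -- head row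
        simp only [List.map_map, Function.comp_def]
        have h1 : (fun q : String × List Int =>
            PySem.List.pyGetD (pvCut (p.2 :: ps.map Prod.snd) (q.2.drop r)) 0 []) =
            (fun q : String × List Int => (q.2.drop r).take p.2.length) := by
          funext q
          simp [pvCut, PySem.List.pyGetD, PySem.List.slice_to_natCast]
        rw [h1, List.zip_map']
        have h2 : ∀ q : String × List Int,
            PySem.List.slice q.2 (some (r : Int)) (some ((r : Int) + (p.2.length : Int))) =
            (q.2.drop r).take p.2.length := by
          intro q
          have := PySem.List.slice_natCast_add q.2 r p.2.length
          simpa using this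
        simp only [h2]
      · -- tail rows
        rw [enum_shift, List.map_map]
        have h3 : ∀ q ∈ PySem.List.enumerate (ps.map Prod.fst) 0,
            ((fun p0 => (p0.2, (Q.map Prod.fst).zip ((Q.map (fun q0 => pvCut (p.2 :: ps.map Prod.snd) (q0.2.drop r))).map
                (fun col => PySem.List.pyGetD col p0.1 [])))) ∘ (fun p0 => (p0.1 + 1, p0.2))) q
            = (q.2, (Q.map Prod.fst).zip ((Q.map (fun q0 => pvCut (ps.map Prod.snd) (q0.2.drop (r + p.2.length)))).map
                (fun col => PySem.List.pyGetD col q.1 []))) := by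
          intro q hq
          rcases (PySem.List.mem_enumerate_iff _ _ _).mp hq with ⟨k, hk, rfl⟩
          simp only [Function.comp_def]
          congr 1
          congr 1
          rw [List.map_map, List.map_map]
          refine List.map_congr_left ?_
          intro w _
          simp only [Function.comp_def, pvCut]
          rw [show ((0 : Int) + (k : Int) + 1) = ((k + 1 : Nat) : Int) by push_cast; ring,
              PySem.List.pyGetD_natCast]
          simp only [List.getD_cons_succ]
          rw [show ((0 : Int) + (k : Int)) = ((k : Nat) : Int) by ring,
              PySem.List.pyGetD_natCast]
          congr 1
          rw [PySem.List.slice_from_natCast, List.drop_drop]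
        rw [List.map_congr_left h3]
        have := ih (r + p.2.length)
        rw [show ((r : Int) + (p.2.length : Int)) = ((r + p.2.length : Nat) : Int) by push_cast; ring]
        exact this

-- the two ports agree for arbitrary dicts with distinct keys
theorem main_eq (cellsD cdrD : PySem.Dict String (List Int))
    (h1 : cellsD.keys.Nodup) (h2 : cdrD.keys.Nodup) :
    ((cdrD.keys.foldl (fun cd key =>
        (cellsD.keys.foldl
          (fun (st : PySem.Dict String (PySem.Dict String (List Int)) × Int) k =>
            let len : Int := ((cellsD.getD k []).length : Int)
            (st.1.insert k ((st.1.getD k PySem.Dict.empty).insert key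
                (PySem.List.slice (cdrD.getD key []) (some st.2) (some (st.2 + len)))),
             st.2 + len))
          (cd, (0 : Int))).1)
        (cellsD.keys.foldl (fun acc k => acc.insert k PySem.Dict.empty) PySem.Dict.empty)).items).map
      (fun p => (p.1, p.2.items))
    = (PySem.List.enumerate cellsD.keys).map (fun p =>
        (p.2, (PySem.Dict.ofList (cdrD.keys.zip ((cdrD.values.map (fun d => pvCut cellsD.values d)).map
            (fun col => PySem.List.pyGetD col p.1 [])))).items)) := by
  have hinit : (cellsD.keys.foldl (fun acc k => acc.insert k PySem.Dict.empty)
      (PySem.Dict.empty : PySem.Dict String (PySem.Dict String (List Int)))).items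
      = pvRowsFor [] cellsD.items 0 := by
    have h := PySem.Dict.items_foldl_insert_fresh cellsD.keys (fun k => k)
      (fun _ => (PySem.Dict.empty : PySem.Dict String (List Int)))
      (PySem.Dict.empty : PySem.Dict String (PySem.Dict String (List Int)))
      (fun a _ => rfl) (by simpa using h1)
    rw [pvRowsFor_nil]
    have hk : cellsD.keys = cellsD.items.map Prod.fst := rfl
    rw [hk] at h
    simpa [List.map_map, Function.comp] using h
  have hfold : cdrD.keys.foldl (fun cd key =>
        (cellsD.keys.foldl
          (fun (st : PySem.Dict String (PySem.Dict String (List Int)) × Int) k =>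
            let len : Int := ((cellsD.getD k []).length : Int)
            (st.1.insert k ((st.1.getD k PySem.Dict.empty).insert key
                (PySem.List.slice (cdrD.getD key []) (some st.2) (some (st.2 + len)))),
             st.2 + len))
          (cd, (0 : Int))).1)
        (cellsD.keys.foldl (fun acc k => acc.insert k PySem.Dict.empty) PySem.Dict.empty)
      = cdrD.items.foldl (fun cd q =>
        (cellsD.keys.foldl
          (fun (st : PySem.Dict String (PySem.Dict String (List Int)) × Int) k =>
            let len : Int := ((cellsD.getD k []).length : Int)
            (st.1.insert k ((st.1.getD k PySem.Dict.empty).insert q.1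
                (PySem.List.slice q.2 (some st.2) (some (st.2 + len)))),
             st.2 + len))
          (cd, (0 : Int))).1)
        (cellsD.keys.foldl (fun acc k => acc.insert k PySem.Dict.empty) PySem.Dict.empty) := by
    have hk : cdrD.keys = cdrD.items.map Prod.fst := rfl
    rw [hk, List.foldl_map]
    refine PySem.List.foldl_congr_mem _ _ _ _ ?_
    intro acc q hqmem
    have hg : cdrD.getD q.1 [] = q.2 := PySem.Dict.getD_of_mem_items cdrD hqmem h2 _
    simp only [hg]
  rw [hfold]
  have houter := outer_fold_items cellsD h1 cdrD.items [] _ hinit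
    (by simpa using h2)
  rw [houter]
  -- B side: peel dict(zip(keys, ...)) back to the zip list, then apply cut_rows
  have hlen : ∀ vals : List (List Int), vals.length = cdrD.keys.length →
      ∀ p : Int × String, (PySem.Dict.ofList (cdrD.keys.zip vals)).items = cdrD.keys.zip vals := by
    intro vals hv p
    refine items_ofList_nodup _ ?_
    have hle : cdrD.keys.length ≤ vals.length := by omega
    rw [List.map_fst_zip hle]
    exact h2
  have hB : (PySem.List.enumerate cellsD.keys).map (fun p =>
        (p.2, (PySem.Dict.ofList (cdrD.keys.zip ((cdrD.values.map (fun d => pvCut cellsD.values d)).map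
            (fun col => PySem.List.pyGetD col p.1 [])))).items))
      = (PySem.List.enumerate cellsD.keys).map (fun p =>
        (p.2, cdrD.keys.zip ((cdrD.values.map (fun d => pvCut cellsD.values d)).map
            (fun col => PySem.List.pyGetD col p.1 [])))) := by
    refine List.map_congr_left ?_
    intro p _
    rw [hlen _ (by simp [PySem.Dict.values, PySem.Dict.keys]) p]
  rw [hB]
  have hkeys : cdrD.keys = cdrD.items.map Prod.fst := rfl
  have hvals : cdrD.values = cdrD.items.map Prod.snd := rfl
  have hck : cellsD.keys = cellsD.items.map Prod.fst := rfl
  have hcv : cellsD.values = cellsD.items.map Prod.snd := rfl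
  have hcr := cut_rows cdrD.items cellsD.items 0
  simp only [List.drop_zero, Nat.cast_zero] at hcr
  rw [hkeys, hvals, hck, hcv, List.map_map]
  simp only [List.nil_append, Function.comp_def]
  exact hcr.symm

-- ===== VERDICT (by name: the statement is the Claim_ definition above) =====
theorem cell_data_from_raw_spec : Claim_equal_cell_data_from_raw := by
  intro cells cell_data_raw _
  show cell_data_from_raw cells cell_data_raw = cell_data_from_raw_alt cells cell_data_raw
  simp only [cell_data_from_raw, cell_data_from_raw_alt]
  exact main_eq (PySem.Dict.ofList cells) (PySem.Dict.ofList cell_data_raw)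
    (PySem.Dict.nodup_keys_ofList cells) (PySem.Dict.nodup_keys_ofList cell_data_raw)
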